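-- pv_equiv track=rewrite | github.com/szczurek-lab/DelSIEVE_benchmark_pipeline | scripts/extract_info_from_vcf.py | is_zero_and_more
-- ===== SOURCE A (Python) =====
-- def is_zero_and_more(values: list[str]) -> bool:
--     if values is None or len(values) == 0:
--         return False
--
--     results: list[int] = []
--     for i in values:
--         try:
--             value = int(i)
--         except ValueError:
--             return False
--
--         results.append(value)
--
--     results.sort()
--
--     if results[0] == 0 and results[-1] > 0:
--         return True
--     else:
--         return False
-- ===== SOURCE B (Python) =====
-- def is_zero_and_more(values: list[str]) -> bool:
--     if values is None or len(values) == 0: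
--         return False
--
--     has_zero = False
--     has_positive = False
--     has_negative = False
--     for i in values:
--         try:
--             value = int(i)
--         except ValueError:
--             return False
--         has_zero = has_zero or value == 0
--         has_positive = has_positive or value > 0
--         has_negative = has_negative or value < 0
--
--     return has_zero and has_positive and not has_negative
-- ===== Notes on version B (the rewrite author's own statement) =====
-- stated objective: simpler
-- what changed: B replaces A's accumulate-all-then-sort-and-inspect-endpoints approach with a single pass maintaining three running sign flags (has_zero/has_positive/has_negative) and returning their conjunction, eliminating the results list and the sort.
import Mathlib
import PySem

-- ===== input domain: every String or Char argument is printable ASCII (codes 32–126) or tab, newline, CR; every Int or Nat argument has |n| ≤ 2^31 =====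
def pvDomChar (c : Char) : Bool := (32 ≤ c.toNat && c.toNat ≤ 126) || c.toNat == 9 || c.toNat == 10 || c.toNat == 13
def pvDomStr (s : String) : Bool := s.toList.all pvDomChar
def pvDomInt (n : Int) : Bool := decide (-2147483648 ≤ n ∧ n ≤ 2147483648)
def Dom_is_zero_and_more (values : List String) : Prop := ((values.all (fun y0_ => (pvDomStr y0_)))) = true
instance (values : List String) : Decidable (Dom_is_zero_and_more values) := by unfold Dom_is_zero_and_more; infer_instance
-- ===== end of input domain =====

-- B replaces A's accumulate/sort/inspect-endpoints scheme with a single pass over three running sign flags (simpler: no intermediate list, no sort).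

-- ===== PORT A =====
-- A's for-loop: build the list of parsed ints; none = the ValueError early 'return False'.
def pvALoop (values : List String) (results : List Int) : Option (List Int) :=
  match values with
  | [] => some results
  | i :: rest =>
    match PySem.Int.ofStr? i with
    | none => none
    | some value => pvALoop rest (results ++ [value])

def is_zero_and_more (values : List String) : Bool :=
  -- 'values is None' is unrepresentable for List String; 'len(values) == 0' is the length test
  if values.length = 0 then false
  else
    match pvALoop values [] with
    | none => false
    | some results =>
      let s := PySem.List.sorted results (fun x => x) false
      match PySem.List.pyGet? s 0, PySem.List.pyGet? s (-1) with
      | some a, some b => a == 0 && decide (0 < b)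
      | _, _ => false

-- ===== PORT B =====
-- B's for-loop over the three boolean flags; at the end of the loop the conjunction is returned.
def pvBLoop (values : List String) (has_zero has_positive has_negative : Bool) : Bool :=
  match values with
  | [] => has_zero && has_positive && !has_negative
  | i :: rest =>
    match PySem.Int.ofStr? i with
    | none => false
    | some value =>
      pvBLoop rest (has_zero || value == 0) (has_positive || decide (0 < value))
        (has_negative || decide (value < 0))

def is_zero_and_more_alt (values : List String) : Bool :=
  if values.length = 0 then false
  else pvBLoop values false false false

-- ===== PRECONDITION & SPEC =====
def Spec_is_zero_and_more (values : List String) (out : Bool) : Prop := out = is_zero_and_more_alt values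
instance (values : List String) (out : Bool) : Decidable (Spec_is_zero_and_more values out) := by unfold Spec_is_zero_and_more; infer_instance

-- ===== CLAIM (what is proved, stated in full; the proofs are below) =====
def Claim_equal_is_zero_and_more : Prop := ∀ (values : List String), Dom_is_zero_and_more values → Spec_is_zero_and_more values (is_zero_and_more values)

-- ===== LEMMAS AND PROOFS =====

-- pure parse of the whole list (proof helper)
def pvParseAll : List String → Option (List Int)
  | [] => some []
  | i :: rest =>
    match PySem.Int.ofStr? i with
    | none => none
    | some v => (pvParseAll rest).map (v :: ·)

theorem pvALoop_eq (values : List String) :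
    ∀ acc, pvALoop values acc = (pvParseAll values).map (acc ++ ·) := by
  induction values with
  | nil => intro acc; simp [pvALoop, pvParseAll]
  | cons i rest ih =>
    intro acc
    cases hv : PySem.Int.ofStr? i with
    | none => simp [pvALoop, pvParseAll, hv]
    | some v =>
      cases hr : pvParseAll rest with
      | none => simp [pvALoop, pvParseAll, hv, hr, ih]
      | some l => simp [pvALoop, pvParseAll, hv, hr, ih]

def pvFlags (l : List Int) (hz hp hn : Bool) : Bool :=
  ((hz || l.any (fun v => v == 0)) && (hp || l.any (fun v => decide (0 < v)))) &&
    !(hn || l.any (fun v => decide (v < 0)))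

theorem pvBLoop_eq (values : List String) :
    ∀ hz hp hn, pvBLoop values hz hp hn =
      match pvParseAll values with
      | none => false
      | some l => pvFlags l hz hp hn := by
  induction values with
  | nil => intro hz hp hn; simp [pvBLoop, pvParseAll, pvFlags, Bool.and_assoc]
  | cons i rest ih =>
    intro hz hp hn
    cases hv : PySem.Int.ofStr? i with
    | none => simp [pvBLoop, pvParseAll, hv]
    | some v =>
      cases hr : pvParseAll rest with
      | none => simp [pvBLoop, pvParseAll, hv, hr, ih]
      | some l => simp [pvBLoop, pvParseAll, hv, hr, ih, pvFlags, Bool.or_assoc]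

theorem pv_le_getLast_of_pairwise :
    ∀ (l : List Int) (hl : l ≠ []), l.Pairwise (· ≤ ·) → ∀ y ∈ l, y ≤ l.getLast hl := by
  intro l
  induction l with
  | nil => intro hl; exact absurd rfl hl
  | cons a t ih =>
    intro _ hp y hy
    cases hp with
    | cons ha ht =>
      cases t with
      | nil => simp_all
      | cons b u =>
        rw [List.getLast_cons (by simp)]
        rcases List.mem_cons.mp hy with h | h
        · subst h
          exact le_trans (ha _ (List.getLast_mem _)) (le_refl _)
        · exact ih (by simp) ht y h

-- the core: sorted-endpoint test = flag test, for nonempty results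
theorem pv_check_eq_flags (l : List Int) (hne : l ≠ []) :
    (let s := PySem.List.sorted l (fun x => x) false
     match PySem.List.pyGet? s 0, PySem.List.pyGet? s (-1) with
     | some a, some b => a == 0 && decide (0 < b)
     | _, _ => false) = pvFlags l false false false := by
  have hperm : (PySem.List.sorted l (fun x => x) false).Perm l :=
    PySem.List.sorted_perm l (fun x => x) false
  have hsne : PySem.List.sorted l (fun x => x) false ≠ [] := by
    intro h; exact hne (List.Perm.eq_nil (h ▸ hperm).symm ▸ rfl)
  cases hs : PySem.List.sorted l (fun x => x) false with
  | nil => exact absurd hs hsne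
  | cons m t =>
    have hpw : (m :: t).Pairwise (fun a b : Int => a ≤ b) := by
      have := PySem.List.sorted_pairwise (xs := l) (key := fun x : Int => x)
      rwa [hs] at this
    have hmin : ∀ y ∈ l, m ≤ y := PySem.List.key_head_sorted_le l (fun x : Int => x) hs
    have hmemperm : ∀ x, x ∈ m :: t ↔ x ∈ l := fun x => (hs ▸ hperm).mem_iff
    have hmmem : m ∈ l := (hmemperm m).mp (by simp)
    set b := (m :: t).getLast (by simp) with hb
    have hbmem : b ∈ l := (hmemperm b).mp (List.getLast_mem _)
    have hmax : ∀ y ∈ l, y ≤ b := fun y hy =>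
      pv_le_getLast_of_pairwise (m :: t) (by simp) hpw y ((hmemperm y).mpr hy)
    have hlast : PySem.List.pyGet? (m :: t) (-1) = some b := by
      rw [PySem.List.pyGet?_neg_one]
      simp [List.getLast?_eq_some_getLast, hb]
    simp only [PySem.List.pyGet?_zero_cons, hlast]
    have key : ((m == 0 && decide (0 < b)) = true) ↔ (pvFlags l false false false = true) := by
      simp only [pvFlags, Bool.false_or, Bool.and_eq_true, Bool.not_eq_true',
        List.any_eq_true, List.any_eq_false, beq_iff_eq, decide_eq_true_eq,
        decide_eq_false_iff_not, not_lt]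
      constructor
      · rintro ⟨hm0, hbpos⟩
        exact ⟨⟨⟨m, hmmem, hm0⟩, ⟨b, hbmem, hbpos⟩⟩, fun v hv => hm0 ▸ hmin v hv⟩
      · rintro ⟨⟨⟨z, hz, hz0⟩, ⟨p, hp', hp0⟩⟩, hnn⟩
        have h1 : m ≤ 0 := hz0 ▸ hmin z hz
        have h2 : 0 ≤ m := hnn m hmmem
        exact ⟨le_antisymm h1 h2, lt_of_lt_of_le hp0 (hmax p hp')⟩
    exact Bool.eq_iff_iff.mpr key

-- ===== VERDICT (by name: the statement is the Claim_ definition above) =====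
theorem is_zero_and_more_spec : Claim_equal_is_zero_and_more := by
  intro values _
  unfold Spec_is_zero_and_more is_zero_and_more is_zero_and_more_alt
  by_cases hlen : values.length = 0
  · simp [hlen]
  · simp only [hlen, if_false]
    rw [pvALoop_eq, pvBLoop_eq]
    cases hp : pvParseAll values with
    | none => simp
    | some l =>
      have hne : l ≠ [] := by
        intro h
        subst h
        cases values with
        | nil => exact hlen rfl
        | cons i rest =>
          simp only [pvParseAll] at hp
          cases hv : PySem.Int.ofStr? i <;>
            simp [hv, Option.map_eq_some_iff] at hp
      simp only [Option.map_some, List.nil_append]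
      exact pv_check_eq_flags l hne
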